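-- pv_equiv track=rewrite | github.com/setuhn/Advent-of-Code | 2015/day_13.py | generate_arrangements
-- ===== SOURCE A (Python) =====
-- def generate_arrangements(people):
--     arrange = list(people.keys())
--     arrangements = [arrange.copy()]
--
--     same = False
--
--     while not same:
--         arrange.insert(1, arrange.pop())
--
--         if arrange == arrangements[0]:
--             same = True
--
--         else:
--             arrangements.append(arrange.copy())
--
--     return arrangements
-- ===== SOURCE B (Python) =====
-- def generate_arrangements(people):
--     keys = list(people.keys())
--     head, tail = keys[0], keys[1:]
--     n = len(tail)
--     return [[head] + tail[n - i:] + tail[:n - i] for i in range(n)] or [keys]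
-- ===== Notes on version B (the rewrite author's own statement) =====
-- stated objective: simpler
-- what changed: A mutates the key list with repeated pop/insert inside a while loop that detects the cycle by comparing against the first arrangement; B generates the same n-1 tail rotations directly as a closed-form list of slices (with 'or [keys]' covering the single-key case).
import Mathlib
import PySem

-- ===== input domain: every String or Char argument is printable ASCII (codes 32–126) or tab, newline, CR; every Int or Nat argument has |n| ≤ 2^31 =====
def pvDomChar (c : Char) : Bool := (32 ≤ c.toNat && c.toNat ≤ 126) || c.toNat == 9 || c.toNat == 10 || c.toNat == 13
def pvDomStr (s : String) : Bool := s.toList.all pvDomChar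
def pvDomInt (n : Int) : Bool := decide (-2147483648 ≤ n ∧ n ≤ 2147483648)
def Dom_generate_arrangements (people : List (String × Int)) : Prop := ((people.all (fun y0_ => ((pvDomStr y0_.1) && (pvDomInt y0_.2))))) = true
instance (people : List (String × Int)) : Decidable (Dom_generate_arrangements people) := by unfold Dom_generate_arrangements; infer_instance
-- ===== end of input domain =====

-- B replaces A's pop/insert loop with cycle detection by a closed-form list of tail rotations (objective: simpler).

-- ===== PORT A =====
-- the while-loop of A, with fuel; fuel is always sufficient under Pre_ (the loop
-- runs at most len(keys) times), so the fuel-0 branch is never the returned value there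
def pvLoopA : Nat → List String → List (List String) → List (List String)
  | 0, _, acc => acc
  | fuel+1, arrange, acc =>
    match PySem.List.pop? arrange with        -- arrange.pop(); raises (none) only on empty arrange
    | none => acc
    | some (x, rest) =>
      let arrange' := PySem.List.insert rest 1 x    -- arrange.insert(1, …)
      if arrange' = acc.headD [] then acc           -- arrange == arrangements[0]
      else pvLoopA fuel arrange' (acc ++ [arrange'])

def generate_arrangements (people : List (String × Int)) : List (List String) :=
  let arrange := PySem.List.dedup (people.map (·.1))   -- list(people.keys())
  pvLoopA (arrange.length + 1) arrange [arrange]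

-- ===== PORT B =====
def generate_arrangements_alt (people : List (String × Int)) : List (List String) :=
  let keys := PySem.List.dedup (people.map (·.1))      -- list(people.keys())
  match PySem.List.pyGet? keys 0 with                  -- keys[0]; raises (none) only on empty input
  | none => []
  | some head =>
    let tail := PySem.List.slice keys (some 1) none    -- keys[1:]
    let n := tail.length
    let r := (List.range n).map (fun (i : Nat) =>
      head :: (PySem.List.slice tail (some ((n : Int) - (i : Int))) none ++
               PySem.List.slice tail none (some ((n : Int) - (i : Int)))))
    if r.isEmpty then [keys] else r                    -- the 'or [keys]' of B

-- ===== PRECONDITION & SPEC =====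
-- Pre_ excludes only the empty dict, on which A raises IndexError (pop from empty list).
def Pre_generate_arrangements (people : List (String × Int)) : Prop := people ≠ []
instance (people : List (String × Int)) : Decidable (Pre_generate_arrangements people) := by unfold Pre_generate_arrangements; infer_instance
def pvWitness_generate_arrangements : (List (String × Int)) := [("a", 1), ("b", 2)]

def Spec_generate_arrangements (people : List (String × Int)) (out : List (List String)) : Prop := out = generate_arrangements_alt people
instance (people : List (String × Int)) (out : List (List String)) : Decidable (Spec_generate_arrangements people out) := by unfold Spec_generate_arrangements; infer_instance

-- ===== CLAIM (what is proved, stated in full; the proofs are below) =====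
def Claim_equal_generate_arrangements : Prop := ∀ (people : List (String × Int)), Dom_generate_arrangements people → Pre_generate_arrangements people → Spec_generate_arrangements people (generate_arrangements people)

-- ===== LEMMAS AND PROOFS =====

-- the i-th right-rotation of the tail
def pvRR (t : List String) (i : Nat) : List String :=
  t.drop (t.length - i) ++ t.take (t.length - i)

theorem pvRR_zero (t : List String) : pvRR t 0 = t := by simp [pvRR]

theorem pvRR_full (t : List String) : pvRR t t.length = t := by simp [pvRR]

-- one loop body step: pop last, insert at 1, advances pvRR by one
theorem pv_step (h : String) (t : List String) (i : Nat) (hi : i < t.length) :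
    ∃ x rest, PySem.List.pop? (h :: pvRR t i) = some (x, rest) ∧
      PySem.List.insert rest 1 x = h :: pvRR t (i+1) := by
  have hm1 : t.length - i - 1 < t.length := by omega
  have htake : t.take (t.length - i) = t.take (t.length - i - 1) ++ [t[t.length - i - 1]] := by
    conv_lhs => rw [show t.length - i = (t.length - i - 1) + 1 by omega]
    rw [List.take_add_one]
    simp [List.getElem?_eq_getElem hm1]
  refine ⟨t[t.length - i - 1], h :: (t.drop (t.length - i) ++ t.take (t.length - i - 1)), ?_, ?_⟩
  · have hsplit : h :: pvRR t i =
        (h :: (t.drop (t.length - i) ++ t.take (t.length - i - 1))) ++ [t[t.length - i - 1]] := by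
      simp [pvRR, htake]
    rw [hsplit, PySem.List.pop?_last]
  · rw [show (1 : Int) = ((1 : Nat) : Int) by norm_num,
      PySem.List.insert_natCast _ 1 _ (by simp)]
    have hdrop := List.drop_eq_getElem_cons hm1
    rw [show t.length - i - 1 + 1 = t.length - i from by omega] at hdrop
    simp only [pvRR, show t.length - (i+1) = t.length - i - 1 from by omega, hdrop]
    simp

-- a proper rotation of a duplicate-free nonempty list differs from the list
theorem pvRR_ne (t : List String) (hnd : t.Nodup) (i : Nat) (h1 : 1 ≤ i) (h2 : i < t.length) :
    pvRR t i ≠ t := by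
  intro he
  have hrot : t.rotate (t.length - i) = t := by
    rw [List.rotate_eq_drop_append_take (by omega)]; exact he
  rcases (hnd.rotate_eq_self_iff).1 hrot with hmod | hnil
  · rw [Nat.mod_eq_of_lt (by omega)] at hmod
    omega
  · subst hnil; simp at h2

-- the loop from state h :: pvRR t i emits exactly the remaining rotations
theorem pvLoopA_spec (h : String) (t : List String) (hnd : t.Nodup) :
    ∀ k i (rest : List (List String)) fuel, i + k + 1 = t.length → k + 1 ≤ fuel →
      pvLoopA fuel (h :: pvRR t i) ((h :: t) :: rest) =
        ((h :: t) :: rest) ++ (List.range' (i+1) k).map (fun j => h :: pvRR t j) := by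
  intro k
  induction k with
  | zero =>
    intro i rest fuel hik hf
    obtain ⟨f, rfl⟩ : ∃ f, fuel = f + 1 := ⟨fuel - 1, by omega⟩
    obtain ⟨x, r, hpop, hins⟩ := pv_step h t i (by omega)
    simp only [pvLoopA, hpop, hins]
    rw [show i + 1 = t.length by omega, pvRR_full]
    simp
  | succ k ih =>
    intro i rest fuel hik hf
    obtain ⟨f, rfl⟩ : ∃ f, fuel = f + 1 := ⟨fuel - 1, by omega⟩
    obtain ⟨x, r, hpop, hins⟩ := pv_step h t i (by omega)
    simp only [pvLoopA, hpop, hins]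
    have hne : h :: pvRR t (i+1) ≠ ((h :: t) :: rest).headD [] := by
      simp only [List.headD_cons, ne_eq, List.cons.injEq, not_and]
      intro _
      exact pvRR_ne t hnd (i+1) (by omega) (by omega)
    rw [if_neg hne]
    have := ih (i+1) (rest ++ [h :: pvRR t (i+1)]) f (by omega) (by omega)
    simp only [List.cons_append, List.append_assoc] at this ⊢
    rw [this]
    rw [List.range'_succ]
    simp

-- the two sides agree for any nonempty duplicate-free key list
theorem pv_main (keys : List String) (hknz : keys ≠ []) (hnd : keys.Nodup) :
    pvLoopA (keys.length + 1) keys [keys] =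
      match PySem.List.pyGet? keys 0 with
      | none => []
      | some head =>
        let tail := PySem.List.slice keys (some 1) none
        let n := tail.length
        let r := (List.range n).map (fun (i : Nat) =>
          head :: (PySem.List.slice tail (some ((n : Int) - (i : Int))) none ++
                   PySem.List.slice tail none (some ((n : Int) - (i : Int)))))
        if r.isEmpty then [keys] else r := by
  obtain ⟨h, t, rfl⟩ : ∃ h t, keys = h :: t := by
    cases keys with
    | nil => exact absurd rfl hknz
    | cons h t => exact ⟨h, t, rfl⟩
  have htnd : t.Nodup := (List.nodup_cons.1 hnd).2
  have hget : PySem.List.pyGet? (h :: t) 0 = some h := by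
    simp [PySem.List.pyGet?, PySem.List.pyIdx?]
  rw [hget]
  simp only [PySem.List.slice_from_one, List.tail_cons]
  cases t with
  | nil =>
    simp [pvLoopA, PySem.List.pop?, PySem.List.pyIdx?, PySem.List.insert]
  | cons y ys =>
    set t := y :: ys with hts
    have htne : t ≠ [] := by simp [hts]
    have hn1 : 1 ≤ t.length := by simp [hts]
    -- right-hand side: the comprehension is the rotation list
    have hmap : (List.range t.length).map (fun (i : Nat) =>
        h :: (PySem.List.slice t (some ((t.length : Int) - (i : Int))) none ++
              PySem.List.slice t none (some ((t.length : Int) - (i : Int))))) =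
        (List.range t.length).map (fun i => h :: pvRR t i) := by
      apply List.map_congr_left
      intro i hi
      rw [List.mem_range] at hi
      have hcast : (t.length : Int) - (i : Int) = ((t.length - i : Nat) : Int) := by
        push_cast [Nat.cast_sub (le_of_lt hi)]; ring
      rw [hcast, PySem.List.slice_from_natCast, PySem.List.slice_to_natCast]
      rfl
    rw [hmap]
    have hre : ((List.range t.length).map (fun i => h :: pvRR t i)).isEmpty = false := by
      rw [List.isEmpty_eq_false_iff_exists_mem]
      exact ⟨h :: pvRR t 0, List.mem_map_of_mem (by rw [List.mem_range]; omega)⟩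
    rw [hre]
    simp only [Bool.false_eq_true, if_false]
    -- left-hand side via the loop lemma
    have hlen : (h :: t).length + 1 = t.length + 2 := by simp
    have spec := pvLoopA_spec h t htnd (t.length - 1) 0 [] (t.length + 2) (by omega) (by omega)
    rw [pvRR_zero] at spec
    rw [hlen, spec]
    conv_rhs => rw [List.range_eq_range',
      show t.length = (t.length - 1) + 1 from by omega, List.range'_succ]
    simp only [List.map_cons, pvRR_zero, zero_add]
    simp

-- ===== VERDICT (by name: the statement is the Claim_ definition above) =====
theorem generate_arrangements_spec : Claim_equal_generate_arrangements := by
  intro people _ hpre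
  unfold Spec_generate_arrangements generate_arrangements generate_arrangements_alt
  have hknz : PySem.List.dedup (people.map (·.1)) ≠ [] := by
    cases people with
    | nil => exact absurd rfl hpre
    | cons p ps =>
      intro hk
      have : p.1 ∈ PySem.List.dedup ((p :: ps).map (·.1)) := by
        rw [PySem.List.mem_dedup]; simp
      rw [hk] at this
      simp at this
  exact pv_main _ hknz (PySem.List.nodup_dedup _)
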